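-- pv_equiv track=rewrite | github.com/polkmn222/programmers | 연습문제/level1/수박수박수박수박수박수.py | solution
-- ===== SOURCE A (Python) =====
-- def solution(n):
--     answer = ''
--     a = "수박"
--     for i in range(1, n+1):
--         if i % 2 != 0:
--             answer += a[0]
--         else:
--             answer += a[1]
--     return answer
-- ===== SOURCE B (Python) =====
-- def solution(n):
--     return ("수박" * (n // 2 + 1))[:n]
-- ===== Notes on version B (the rewrite author's own statement) =====
-- stated objective: faster
-- what changed: Replaces the per-character loop with a parity branch by a closed-form repeat-and-slice: ('수박' * (n//2+1))[:n].
import Mathlib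
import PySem

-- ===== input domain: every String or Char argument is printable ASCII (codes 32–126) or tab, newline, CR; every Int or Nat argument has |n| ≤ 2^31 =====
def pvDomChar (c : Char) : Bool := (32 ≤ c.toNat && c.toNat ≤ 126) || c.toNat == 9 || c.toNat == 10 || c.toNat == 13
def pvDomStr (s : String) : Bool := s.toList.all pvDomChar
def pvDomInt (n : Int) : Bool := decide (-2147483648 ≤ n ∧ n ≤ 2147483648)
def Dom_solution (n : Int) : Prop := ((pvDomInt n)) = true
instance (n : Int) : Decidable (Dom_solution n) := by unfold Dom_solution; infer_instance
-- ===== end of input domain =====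

-- B replaces A's per-index loop (branching on i % 2) by closed-form repeat-and-slice ("수박" * (n//2+1))[:n].

-- ===== PORT A =====
-- answer accumulated as List Char; a[0]/a[1] are in-range so pyGetD is exact here
def solution (n : Int) : String :=
  let a := "수박".toList
  let answer : List Char :=
    (PySem.List.pyRange 1 (n + 1) 1).foldl
      (fun acc i =>
        if PySem.Int.mod i 2 ≠ 0 then acc ++ [PySem.List.pyGetD a 0 ' ']
        else acc ++ [PySem.List.pyGetD a 1 ' ']) []
  String.ofList answer

-- ===== PORT B =====
def solution_alt (n : Int) : String :=
  let reps := PySem.Int.floordiv n 2 + 1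
  let repeated := (List.replicate reps.toNat "수박".toList).flatten
  String.ofList (PySem.List.slice repeated none (some n))

-- ===== PRECONDITION & SPEC =====
def Spec_solution (n : Int) (out : String) : Prop := out = solution_alt n
instance (n : Int) (out : String) : Decidable (Spec_solution n out) := by unfold Spec_solution; infer_instance

-- ===== CLAIM (what is proved, stated in full; the proofs are below) =====
def Claim_equal_solution : Prop := ∀ (n : Int), Dom_solution n → Spec_solution n (solution n)

-- ===== LEMMAS AND PROOFS =====

-- the common closed form: alternating chars by index parity
def pvAlt (m : Nat) : List Char :=
  (List.range m).map (fun k => if k % 2 = 0 then '수' else '박')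

lemma pvFlatten_replicate (k : Nat) :
    (List.replicate k ['수', '박']).flatten = pvAlt (2 * k) := by
  induction k with
  | zero => simp [pvAlt]
  | succ k ih =>
    have h2 : 2 * (k + 1) = 2 + 2 * k := by ring
    simp only [List.replicate_succ, List.flatten_cons, ih, pvAlt, h2, List.range_add,
      List.map_append, List.map_map]
    congr 1
    apply List.map_congr_left
    intro x _
    have : (2 + x) % 2 = x % 2 := by omega
    simp [Function.comp, this]

lemma pvAlt_take (m k : Nat) (h : m ≤ k) : (pvAlt k).take m = pvAlt m := by
  simp [pvAlt, ← List.map_take, List.take_range, Nat.min_eq_left h]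

lemma pvA_chars (n : Int) :
    (PySem.List.pyRange 1 (n + 1) 1).foldl
      (fun acc i =>
        if PySem.Int.mod i 2 ≠ 0 then acc ++ [PySem.List.pyGetD "수박".toList 0 ' ']
        else acc ++ [PySem.List.pyGetD "수박".toList 1 ' ']) [] = pvAlt n.toNat := by
  have hf : (fun (acc : List Char) (i : Int) =>
        if PySem.Int.mod i 2 ≠ 0 then acc ++ [PySem.List.pyGetD "수박".toList 0 ' ']
        else acc ++ [PySem.List.pyGetD "수박".toList 1 ' '])
      = (fun acc i => acc ++ [if PySem.Int.mod i 2 ≠ 0 then PySem.List.pyGetD "수박".toList 0 ' '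
          else PySem.List.pyGetD "수박".toList 1 ' ']) := by
    funext acc i; split <;> rfl
  rw [hf, PySem.List.foldl_append_singleton_eq_map, List.nil_append,
      PySem.List.pyRange_one, List.map_map]
  have hlen : (n + 1 - 1).toNat = n.toNat := by omega
  rw [hlen]
  unfold pvAlt
  apply List.map_congr_left
  intro k _
  have hcast : (1 : Int) + (k : Int) = ((1 + k : Nat) : Int) := by push_cast; ring
  have hm : PySem.Int.mod (1 + (k : Int)) 2 = (1 + (k : Int)) % 2 :=
    PySem.Int.mod_eq_emod_of_pos (by omega)
  by_cases hk : k % 2 = 0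
  · have h1 : (1 + (k : Int)) % 2 = 1 := by omega
    simp [Function.comp, h1, hk, PySem.List.pyGetD]
  · have h1 : (1 + (k : Int)) % 2 = 0 := by omega
    simp [Function.comp, h1, hk, PySem.List.pyGetD]

-- ===== VERDICT (by name: the statement is the Claim_ definition above) =====
theorem solution_spec : Claim_equal_solution := by
  intro n _
  unfold Spec_solution solution solution_alt
  simp only []
  rw [pvA_chars]
  have hs : "수박".toList = ['수', '박'] := rfl
  rw [hs, pvFlatten_replicate]
  by_cases hn : 0 ≤ n
  · rw [PySem.List.slice_to _ hn]
    have hle : n.toNat ≤ 2 * (PySem.Int.floordiv n 2 + 1).toNat := by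
      have h1 : PySem.Int.floordiv n 2 = n / 2 := PySem.Int.floordiv_eq_ediv_of_pos (by omega)
      omega
    rw [pvAlt_take _ _ hle]
  · have hfd : n / 2 + 1 ≤ 0 := by omega
    have h0 : (n / 2 + 1).toNat = 0 := by omega
    have hn0 : n.toNat = 0 := by omega
    simp [PySem.List.slice, h0, hn0, pvAlt]
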